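-- pv_equiv track=rewrite | github.com/W1ndys/Easy-QFNU | Add-matter-template.py | has_metadata_block
-- ===== SOURCE A (Python) =====
-- def has_metadata_block(lines):
--     metadata_block_start = False
--     for line in lines:
--         if line.strip() == "---":
--             if metadata_block_start:
--                 return True
--             else:
--                 metadata_block_start = True
--     return False
-- ===== SOURCE B (Python) =====
-- def has_metadata_block(lines):
--     stripped = [line.strip() for line in lines]
--     if "---" not in stripped:
--         return False
--     return "---" in stripped[stripped.index("---") + 1:]
-- ===== Notes on version B (the rewrite author's own statement) =====
-- stated objective: alternative
-- what changed: Replaced the single stateful flag loop by staged passes: strip all lines once, locate the first delimiter with index(), and test membership of a second delimiter in the slice after it.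
import Mathlib
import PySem

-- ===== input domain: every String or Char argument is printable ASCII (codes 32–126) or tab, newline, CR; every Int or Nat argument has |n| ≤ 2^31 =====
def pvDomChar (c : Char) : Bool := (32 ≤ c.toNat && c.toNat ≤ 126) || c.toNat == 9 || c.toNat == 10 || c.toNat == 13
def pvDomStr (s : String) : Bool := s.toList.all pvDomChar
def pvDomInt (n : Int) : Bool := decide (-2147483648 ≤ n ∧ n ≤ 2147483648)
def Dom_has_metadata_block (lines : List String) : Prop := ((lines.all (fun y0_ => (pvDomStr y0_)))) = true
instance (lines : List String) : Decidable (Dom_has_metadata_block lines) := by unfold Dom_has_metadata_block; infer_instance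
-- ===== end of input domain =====

-- B replaces A's stateful flag loop by staged passes: strip once, find the first delimiter with index(), then test membership after it (alternative decomposition, same cost).

-- ===== PORT A =====
-- the for-loop with the metadata_block_start flag and early return True
def hasMetaLoop : List String → Bool → Bool
  | [], _ => false
  | line :: rest, flag =>
      if PySem.Str.strip line == "---" then
        if flag then true else hasMetaLoop rest true
      else hasMetaLoop rest flag

def has_metadata_block (lines : List String) : Bool := hasMetaLoop lines false

-- ===== PORT B =====
-- stripped = [line.strip() for line in lines]; guard '"---" not in stripped';
-- then '"---" in stripped[stripped.index("---") + 1:]'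
def has_metadata_block_alt (lines : List String) : Bool :=
  let stripped := lines.map PySem.Str.strip
  if !stripped.contains "---" then
    false
  else
    match PySem.List.index? stripped "---" with
    | some i => (PySem.List.slice stripped (some ((i : Int) + 1)) none).contains "---"
    | none => false   -- unreachable: guarded by the membership test (Python would raise here)

-- ===== PRECONDITION & SPEC =====
def Spec_has_metadata_block (lines : List String) (out : Bool) : Prop := out = has_metadata_block_alt lines
instance (lines : List String) (out : Bool) : Decidable (Spec_has_metadata_block lines out) := by unfold Spec_has_metadata_block; infer_instance

-- ===== CLAIM =====
def Claim_equal_has_metadata_block : Prop := ∀ (lines : List String), Dom_has_metadata_block lines → Spec_has_metadata_block lines (has_metadata_block lines)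

-- ===== LEMMAS AND PROOFS =====

-- With the flag set, the loop returns true iff some delimiter line remains.
theorem hasMetaLoop_true (ls : List String) :
    hasMetaLoop ls true = !(ls.filter (fun line => PySem.Str.strip line == "---")).isEmpty := by
  induction ls with
  | nil => rfl
  | cons l rest ih =>
      by_cases h : (PySem.Str.strip l == "---") = true <;>
        simp [hasMetaLoop, List.filter, h, ih]

-- With the flag clear, the loop returns true iff at least two delimiter lines remain.
theorem hasMetaLoop_false (ls : List String) :
    hasMetaLoop ls false =
      match ls.filter (fun line => PySem.Str.strip line == "---") with
      | _ :: _ :: _ => true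
      | _ => false := by
  induction ls with
  | nil => rfl
  | cons l rest ih =>
      by_cases h : (PySem.Str.strip l == "---") = true
      · simp only [hasMetaLoop, List.filter, h, if_pos, hasMetaLoop_true]
        cases rest.filter (fun line => PySem.Str.strip line == "---") <;> simp
      · simp only [hasMetaLoop, List.filter, h, ih]
        simp

-- B, restated on the stripped list: with first index i, the slice after i contains a delimiter
-- iff the filtered list has at least two elements.
theorem alt_eq_twoplus (ss : List String) :
    (if !ss.contains "---" then
      false
    else
      match PySem.List.index? ss "---" with
      | some i => (PySem.List.slice ss (some ((i : Int) + 1)) none).contains "---"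
      | none => false) =
    match ss.filter (fun s => s == "---") with
    | _ :: _ :: _ => true
    | _ => false := by
  by_cases hmem : "---" ∈ ss
  · have hsome : (PySem.List.index? ss "---").isSome := by
      rw [PySem.List.index?_isSome_iff]; exact hmem
    obtain ⟨i, hi⟩ := Option.isSome_iff_exists.mp hsome
    obtain ⟨pre, suf, hdecomp, hlen, hnotin⟩ := (PySem.List.index?_eq_some_iff _ _ _).mp hi
    have hslice : PySem.List.slice ss (some ((i : Int) + 1)) none = suf := by
      have : ((i : Int) + 1) = ((i + 1 : Nat) : Int) := by push_cast; ring
      rw [this, PySem.List.slice_from_natCast, hdecomp, ← hlen]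
      simp [List.drop_append]
    have hprefilter : pre.filter (fun s => s == "---") = [] := by
      simp only [List.filter_eq_nil_iff]
      intro a ha
      simp only [beq_iff_eq]
      intro h; exact hnotin (h ▸ ha)
    have hfilter : ss.filter (fun s => s == "---") =
        "---" :: suf.filter (fun s => s == "---") := by
      rw [hdecomp, List.filter_append, hprefilter]
      simp [List.filter]
    simp only [hi, hslice, hfilter]
    have hc : (!ss.contains "---") = false := by simp [hmem]
    simp only [hc, Bool.false_eq_true, if_false]
    cases hsf : suf.filter (fun s => s == "---") with
    | nil =>
        simp only [List.filter_eq_nil_iff] at hsf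
        by_cases h : "---" ∈ suf
        · exact absurd (by simp) (hsf _ h)
        · simp [h]
    | cons x xs =>
        have hx : x ∈ suf.filter (fun s => s == "---") := by rw [hsf]; exact List.mem_cons_self
        have := List.of_mem_filter hx
        have hxe : x = "---" := by simpa using this
        have : "---" ∈ suf := hxe ▸ List.mem_of_mem_filter hx
        simp [this]
  · have hfilter : ss.filter (fun s => s == "---") = [] := by
      simp only [List.filter_eq_nil_iff]
      intro a ha
      simp only [beq_iff_eq]
      intro h; exact hmem (h ▸ ha)
    simp [hfilter, hmem]

-- the map commutes the delimiter filter from the stripped list back to the raw lines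
theorem filter_map_strip (lines : List String) :
    (lines.map PySem.Str.strip).filter (fun s => s == "---") =
      (lines.filter (fun line => PySem.Str.strip line == "---")).map PySem.Str.strip := by
  rw [List.filter_map]
  rfl

-- ===== VERDICT =====
theorem has_metadata_block_spec : Claim_equal_has_metadata_block := by
  intro lines _
  unfold Spec_has_metadata_block has_metadata_block has_metadata_block_alt
  rw [hasMetaLoop_false]
  rw [show (let stripped := lines.map PySem.Str.strip;
      if !stripped.contains "---" then false
      else
        match PySem.List.index? stripped "---" with
        | some i => (PySem.List.slice stripped (some ((i : Int) + 1)) none).contains "---"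
        | none => false) = _ from alt_eq_twoplus (lines.map PySem.Str.strip)]
  rw [filter_map_strip]
  cases lines.filter (fun line => PySem.Str.strip line == "---") with
  | nil => rfl
  | cons a t => cases t <;> rfl
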